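-- pv_equiv track=rewrite | github.com/gabrigio30/thesis | src/detector.py | _mem_operands_may_alias
-- ===== SOURCE A (Python) =====
-- from typing import List, Dict, Optional, Callable
--
-- def _is_mem_operand(op: str) -> bool:
--     return '(' in op and ')' in op
--
-- def _base_reg_of_memop(op: str) -> Optional[str]:
--     """Estrae il base register dall'addressing mode AT&T: disp(base,index,scale)."""
--     if not _is_mem_operand(op):
--         return None
--     inside = op[op.find('(') + 1: op.find(')')]
--     parts = [p.strip() for p in inside.split(',') if p.strip()]
--     if not parts:
--         return None
--     return parts[0] if parts[0].startswith('%') else None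
--
-- def _mem_operands_may_alias(store_mems: List[str], load_mems: List[str]) -> bool:
--     """
--     Alias euristico (più stretto del tuo): stesso base register (non stack, non rip).
--     Questo elimina un sacco di falsi positivi e riduce overlap.
--     """
--     for so in store_mems:
--         b1 = _base_reg_of_memop(so)
--         if not b1 or b1 in {'%rbp', '%rsp', '%ebp', '%esp', '%rip'}:
--             continue
--         for lo in load_mems:
--             if _base_reg_of_memop(lo) == b1:
--                 return True
--     return False
-- ===== SOURCE B (Python) =====
-- from typing import List, Optional
--
-- _SPECIAL = {'%rbp', '%rsp', '%ebp', '%esp', '%rip'}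
--
-- def _is_mem_operand(op: str) -> bool:
--     return '(' in op and ')' in op
--
-- def _base_reg_of_memop(op: str) -> Optional[str]:
--     """Estrae il base register dall'addressing mode AT&T: disp(base,index,scale)."""
--     if not _is_mem_operand(op):
--         return None
--     inside = op[op.find('(') + 1: op.find(')')]
--     parts = [p.strip() for p in inside.split(',') if p.strip()]
--     if not parts:
--         return None
--     return parts[0] if parts[0].startswith('%') else None
--
-- def _mem_operands_may_alias(store_mems: List[str], load_mems: List[str]) -> bool:
--     store_bases = {b for so in store_mems
--                    if (b := _base_reg_of_memop(so)) is not None and b not in _SPECIAL}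
--     load_bases = {b for lo in load_mems
--                   if (b := _base_reg_of_memop(lo)) is not None}
--     return bool(store_bases & load_bases)
-- ===== Notes on version B (the rewrite author's own statement) =====
-- stated objective: simpler
-- what changed: Replaces the nested early-exit scan (re-deriving every load's base register for each store) with two independent index-building passes that collect the store bases and the load bases into sets, finishing with a single set intersection; each load operand is parsed once instead of once per store.
import Mathlib
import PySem

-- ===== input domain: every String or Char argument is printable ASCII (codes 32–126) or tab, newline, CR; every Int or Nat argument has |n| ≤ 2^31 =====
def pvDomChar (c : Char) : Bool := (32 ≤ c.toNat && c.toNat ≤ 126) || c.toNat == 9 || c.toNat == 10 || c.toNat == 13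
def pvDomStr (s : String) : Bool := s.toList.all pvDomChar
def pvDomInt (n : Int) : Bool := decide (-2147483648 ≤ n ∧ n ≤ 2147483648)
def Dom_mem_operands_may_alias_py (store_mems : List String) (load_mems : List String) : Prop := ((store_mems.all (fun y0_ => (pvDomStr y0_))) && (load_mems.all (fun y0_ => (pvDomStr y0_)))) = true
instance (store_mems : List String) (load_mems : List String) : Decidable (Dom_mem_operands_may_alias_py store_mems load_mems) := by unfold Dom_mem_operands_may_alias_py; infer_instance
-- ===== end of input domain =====

-- B replaces the nested per-store rescan of all loads with two independent
-- index-building passes (store-base set, load-base set) and one set intersection;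
-- objective: simpler traversal, each operand parsed once.

-- ===== PORT A =====
-- shared module helpers, ported step for step (used by both Pythons verbatim)
def pyIsMemOperand (op : String) : Bool :=
  PySem.Str.isIn "(" op && PySem.Str.isIn ")" op

def pyBaseRegOfMemop (op : String) : Option String :=
  if pyIsMemOperand op = false then none
  else
    let inside := PySem.Str.slice op (some (PySem.Str.find op "(" + 1)) (some (PySem.Str.find op ")"))
    let parts := ((PySem.Chars.splitOn inside.toList [',']).map (fun p => String.ofList (PySem.Chars.strip p))).filter (fun p => p != "")
    match parts with
    | [] => none
    | p0 :: _ => if PySem.Str.startswith p0 "%" then some p0 else none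

def mem_operands_may_alias_py (store_mems : List String) (load_mems : List String) : Bool :=
  store_mems.any (fun so =>
    match pyBaseRegOfMemop so with
    | none => false
    | some b1 =>
      if b1 == "" || b1 == "%rbp" || b1 == "%rsp" || b1 == "%ebp" || b1 == "%esp" || b1 == "%rip"
      then false
      else load_mems.any (fun lo => pyBaseRegOfMemop lo == some b1))

-- ===== PORT B =====
def pySpecial : List String := ["%rbp", "%rsp", "%ebp", "%esp", "%rip"]

def mem_operands_may_alias_py_alt (store_mems : List String) (load_mems : List String) : Bool :=
  let store_bases : PySem.Set String := PySem.Set.ofList (store_mems.filterMap (fun so =>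
    match pyBaseRegOfMemop so with
    | none => none
    | some b => if pySpecial.contains b then none else some b))
  let load_bases : PySem.Set String := PySem.Set.ofList (load_mems.filterMap (fun lo => pyBaseRegOfMemop lo))
  !(PySem.Set.inter store_bases load_bases).isEmpty

-- ===== PRECONDITION & SPEC =====
def Spec_mem_operands_may_alias_py (store_mems : List String) (load_mems : List String) (out : Bool) : Prop := out = mem_operands_may_alias_py_alt store_mems load_mems
instance (store_mems : List String) (load_mems : List String) (out : Bool) : Decidable (Spec_mem_operands_may_alias_py store_mems load_mems out) := by unfold Spec_mem_operands_may_alias_py; infer_instance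

-- ===== CLAIM (what is proved, stated in full; the proofs are below) =====
def Claim_equal_mem_operands_may_alias_py : Prop := ∀ (store_mems : List String) (load_mems : List String), Dom_mem_operands_may_alias_py store_mems load_mems → Spec_mem_operands_may_alias_py store_mems load_mems (mem_operands_may_alias_py store_mems load_mems)

-- ===== LEMMAS AND PROOFS =====

-- a base register returned by the helper always starts with '%', hence is nonempty
lemma pyBaseReg_ne_empty {op b : String} (h : pyBaseRegOfMemop op = some b) : b ≠ "" := by
  unfold pyBaseRegOfMemop at h
  split at h
  · exact absurd h (by simp)
  · dsimp only at h
    split at h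
    · exact absurd h (by simp)
    · split at h
      · rename_i p0 _ hsw
        cases h
        intro hb
        subst hb
        simp [PySem.Str.startswith] at hsw
        exact absurd hsw (by decide)
      · exact absurd h (by simp)

lemma alias_A_iff (store_mems load_mems : List String) :
    mem_operands_may_alias_py store_mems load_mems = true ↔
    ∃ b, (∃ so ∈ store_mems, pyBaseRegOfMemop so = some b ∧ b ∉ pySpecial) ∧
         (∃ lo ∈ load_mems, pyBaseRegOfMemop lo = some b) := by
  unfold mem_operands_may_alias_py
  rw [List.any_eq_true]
  constructor
  · rintro ⟨so, hso, hx⟩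
    cases hb1 : pyBaseRegOfMemop so with
    | none => rw [hb1] at hx; simp at hx
    | some b1 =>
      rw [hb1] at hx
      dsimp only at hx
      split at hx
      · simp at hx
      · rename_i hspec
        rw [List.any_eq_true] at hx
        obtain ⟨lo, hlo, heq⟩ := hx
        refine ⟨b1, ⟨so, hso, hb1, ?_⟩, ⟨lo, hlo, by simpa using heq⟩⟩
        simp only [Bool.or_eq_true, beq_iff_eq] at hspec
        push Not at hspec
        simp [pySpecial]
        tauto
  · rintro ⟨b, ⟨so, hso, hb, hbs⟩, lo, hlo, hblo⟩
    refine ⟨so, hso, ?_⟩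
    rw [hb]
    dsimp only
    have hne : b ≠ "" := pyBaseReg_ne_empty hb
    simp only [pySpecial, List.mem_cons, List.not_mem_nil] at hbs
    push Not at hbs
    obtain ⟨h1, h2, h3, h4, h5, -⟩ := hbs
    rw [if_neg (by simp [hne, h1, h2, h3, h4, h5])]
    rw [List.any_eq_true]
    exact ⟨lo, hlo, by simp [hblo]⟩

lemma alias_B_iff (store_mems load_mems : List String) :
    mem_operands_may_alias_py_alt store_mems load_mems = true ↔
    ∃ b, (∃ so ∈ store_mems, pyBaseRegOfMemop so = some b ∧ b ∉ pySpecial) ∧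
         (∃ lo ∈ load_mems, pyBaseRegOfMemop lo = some b) := by
  unfold mem_operands_may_alias_py_alt
  simp only [Bool.not_eq_true', List.isEmpty_eq_false_iff_exists_mem]
  constructor
  · rintro ⟨b, hb⟩
    rw [PySem.Set.mem_inter, PySem.Set.mem_ofList, PySem.Set.mem_ofList] at hb
    obtain ⟨hs, hl⟩ := hb
    rw [List.mem_filterMap] at hs hl
    obtain ⟨so, hso, hfs⟩ := hs
    obtain ⟨lo, hlo, hfl⟩ := hl
    refine ⟨b, ⟨so, hso, ?_⟩, ⟨lo, hlo, hfl⟩⟩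
    cases hcase : pyBaseRegOfMemop so with
    | none => rw [hcase] at hfs; simp at hfs
    | some b' =>
      rw [hcase] at hfs
      dsimp only at hfs
      split at hfs
      · simp at hfs
      · rename_i hnot
        have hbb : b' = b := by simpa using hfs
        subst hbb
        exact ⟨rfl, by simpa using hnot⟩
  · rintro ⟨b, ⟨so, hso, hb, hbs⟩, lo, hlo, hblo⟩
    refine ⟨b, ?_⟩
    rw [PySem.Set.mem_inter, PySem.Set.mem_ofList, PySem.Set.mem_ofList,
        List.mem_filterMap, List.mem_filterMap]
    refine ⟨⟨so, hso, ?_⟩, ⟨lo, hlo, hblo⟩⟩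
    rw [hb]
    dsimp only
    rw [if_neg (by simpa using hbs)]

-- ===== VERDICT (by name: the statement is the Claim_ definition above) =====
theorem mem_operands_may_alias_py_spec : Claim_equal_mem_operands_may_alias_py := by
  intro store_mems load_mems _
  unfold Spec_mem_operands_may_alias_py
  rw [Bool.eq_iff_iff, alias_A_iff, alias_B_iff]
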